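-- pv_equiv track=rewrite | github.com/MDP-Group-21/mdp-algo | MDP_codev17(week8).py | burst_mode
-- ===== SOURCE A (Python) =====
-- def burst_mode(text):
--     wstring = 'WWWWWWWWWW'
--     rstring = ''
--     for i in range(10,1,-1):
--         if i == 10:
--             rstring = 'Q'
--         elif i == 9:
--             rstring = 'P'
--         elif i == 8:
--             rstring = 'O'
--         elif i == 7:
--             rstring = 'I'
--         elif i == 6:
--             rstring = 'U'
--         elif i == 5:
--             rstring = 'Y'
--         elif i == 4:
--             rstring = 'T'
--         elif i == 3:
--             rstring = 'R'
--         else: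
--             rstring = 'E'
--         text = text.replace(wstring[:i],rstring)
--     return text
-- ===== SOURCE B (Python) =====
-- def burst_mode(text):
--     tail = {1: 'W', 2: 'E', 3: 'R', 4: 'T', 5: 'Y', 6: 'U', 7: 'I', 8: 'O', 9: 'P'}
--     parts = []
--     i, n = 0, len(text)
--     while i < n:
--         c = text[i]
--         if c != 'W':
--             parts.append(c)
--             i += 1
--         else:
--             j = i + 1
--             while j < n and text[j] == 'W':
--                 j += 1
--             q, r = divmod(j - i, 10)
--             parts.append('Q' * q + tail.get(r, ''))
--             i = j
--     return ''.join(parts)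
-- ===== Notes on version B (the rewrite author's own statement) =====
-- stated objective: alternative
-- what changed: Replaces nine sequential global str.replace passes with a single left-to-right scan that measures each maximal run of the repeated character and emits the quotient/remainder encoding via divmod and a lookup table.
import Mathlib
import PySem

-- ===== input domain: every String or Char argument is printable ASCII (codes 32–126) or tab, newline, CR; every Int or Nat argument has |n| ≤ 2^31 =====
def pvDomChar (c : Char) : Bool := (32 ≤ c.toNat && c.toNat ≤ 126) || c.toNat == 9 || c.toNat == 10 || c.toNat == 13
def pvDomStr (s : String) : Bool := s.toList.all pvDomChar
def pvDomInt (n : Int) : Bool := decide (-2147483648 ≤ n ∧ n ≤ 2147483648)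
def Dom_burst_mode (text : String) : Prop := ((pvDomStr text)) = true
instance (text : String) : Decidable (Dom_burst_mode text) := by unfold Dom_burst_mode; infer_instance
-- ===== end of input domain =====

-- B replaces A's nine global str.replace passes by one left-to-right run scan with divmod; return value proved equal on all inputs.

-- ===== PORT A =====
-- literal transliteration: for i in range(10,1,-1): text = text.replace(wstring[:i], rstring)
def burst_mode (text : String) : String :=
  let wstring : String := "WWWWWWWWWW"
  (PySem.List.pyRange 10 1 (-1)).foldl
    (fun (t : String) (i : Int) =>
      let rstring : String :=
        if i == 10 then "Q" else if i == 9 then "P" else if i == 8 then "O"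
        else if i == 7 then "I" else if i == 6 then "U" else if i == 5 then "Y"
        else if i == 4 then "T" else if i == 3 then "R" else "E"
      PySem.Str.replace t (PySem.Str.slice wstring none (some i)) rstring)
    text

-- ===== PORT B =====
-- tail = {1:'W', 2:'E', ..., 9:'P'}
def pvTailDict : PySem.Dict Int String :=
  PySem.Dict.mk [((1:Int),"W"),((2:Int),"E"),((3:Int),"R"),((4:Int),"T"),((5:Int),"Y"),
                 ((6:Int),"U"),((7:Int),"I"),((8:Int),"O"),((9:Int),"P")]

-- 'Q' * q + tail.get(r, '') for a run of length L (q, r = divmod(L, 10))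
def pvEncodeRun (L : Nat) : List Char :=
  List.replicate (L / 10) 'Q' ++ (pvTailDict.getD ((L % 10 : Nat) : Int) "").toList

-- the single left-to-right scan of Source B: copy non-'W' chars, measure each maximal 'W' run
def pvGoB : List Char → List Char
  | [] => []
  | c :: rest =>
    if c = 'W' then
      pvEncodeRun (1 + (rest.takeWhile (· == 'W')).length) ++ pvGoB (rest.dropWhile (· == 'W'))
    else c :: pvGoB rest
termination_by s => s.length
decreasing_by
  · have := List.length_dropWhile_le (· == 'W') rest
    simp; omega
  · simp

def burst_mode_alt (text : String) : String := String.ofList (pvGoB text.toList)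

-- ===== PRECONDITION & SPEC =====
def Spec_burst_mode (text : String) (out : String) : Prop := out = burst_mode_alt text
instance (text : String) (out : String) : Decidable (Spec_burst_mode text out) := by unfold Spec_burst_mode; infer_instance

-- ===== CLAIM (what is proved, stated in full; the proofs are below) =====
def Claim_equal_burst_mode : Prop := ∀ (text : String), Dom_burst_mode text → Spec_burst_mode text (burst_mode text)

-- ===== LEMMAS AND PROOFS =====

def pvReplaceF (o : Char) (op : List Char) (new : List Char) : List Char → List Char
  | [] => []
  | c :: t =>
    if (o :: op).isPrefixOf (c :: t) then new ++ pvReplaceF o op new (t.drop op.length)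
    else c :: pvReplaceF o op new t
termination_by s => s.length
decreasing_by
  · simp
  · simp

theorem pvReplace_go_eq (o : Char) (op new : List Char) :
    ∀ (fuel : Nat) (rest acc : List Char), rest.length ≤ fuel →
    PySem.Chars.replace.go (o :: op) new fuel rest acc = acc.reverse ++ pvReplaceF o op new rest := by
  intro fuel
  induction fuel with
  | zero =>
    intro rest acc h
    have : rest = [] := by cases rest <;> simp_all
    subst this
    simp [PySem.Chars.replace.go, pvReplaceF]
  | succ n ih =>
    intro rest acc h
    cases rest with
    | nil => simp [PySem.Chars.replace.go, pvReplaceF]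
    | cons c t =>
      rw [PySem.Chars.replace.go]
      by_cases hp : (o :: op).isPrefixOf (c :: t)
      · simp only [hp, if_true]
        rw [ih]
        · rw [pvReplaceF]
          simp [hp]
        · simp at h ⊢
          omega
      · simp only [hp]
        rw [ih t (c :: acc) (by simp at h ⊢; omega)]
        rw [pvReplaceF]
        simp [hp]

theorem pvReplace_eq (o : Char) (op new s : List Char) :
    PySem.Chars.replace s (o :: op) new = pvReplaceF o op new s := by
  rw [PySem.Chars.replace]
  simp [pvReplace_go_eq o op new s.length s []]

def pvW (n : Nat) : List Char := List.replicate n 'W'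

def pvStep (k : Nat) (ρ : Char) (s : List Char) : List Char :=
  pvReplaceF 'W' (pvW k) [ρ] s

theorem pvStep_nil (k : Nat) (ρ : Char) : pvStep k ρ [] = [] := by
  simp [pvStep, pvReplaceF]

theorem pvStep_cons (k : Nat) (ρ c : Char) (t : List Char) (hc : c ≠ 'W') :
    pvStep k ρ (c :: t) = c :: pvStep k ρ t := by
  unfold pvStep
  rw [pvReplaceF]
  have : ('W' :: pvW k).isPrefixOf (c :: t) = false := by
    simp [List.isPrefixOf]
    intro h; exact absurd h.symm hc
  simp [this]

theorem pvNotPrefix : ∀ (m r : Nat) (u : List Char), r < m → u.head? ≠ some 'W' →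
    (List.replicate m 'W').isPrefixOf (pvW r ++ u) = false := by
  intro m
  induction m with
  | zero => intro r u h; omega
  | succ m ih =>
    intro r u hr hu
    cases r with
    | zero =>
      cases u with
      | nil => simp [pvW, List.replicate_succ, List.isPrefixOf]
      | cons c t =>
        have hc : ('W' == c) = false := by
          have h1 : c ≠ 'W' := by simpa using hu
          simp only [beq_eq_false_iff_ne, ne_eq]
          exact fun h => h1 h.symm
        simp [pvW, List.replicate_succ, List.isPrefixOf, hc]
    | succ r =>
      simp only [pvW, List.replicate_succ, List.cons_append, List.isPrefixOf_cons₂_self]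
      exact ih r u (by omega) hu

theorem pvStep_short_run (k : Nat) (ρ : Char) (r : Nat) (u : List Char)
    (hr : r ≤ k) (hu : u.head? ≠ some 'W') :
    pvStep k ρ (pvW r ++ u) = pvW r ++ pvStep k ρ u := by
  induction r with
  | zero => simp [pvW]
  | succ r ih =>
    have hpre : ('W' :: pvW k).isPrefixOf ('W' :: (pvW r ++ u)) = false := by
      have := pvNotPrefix (k+1) (r+1) u (by omega) hu
      simpa [pvW, List.replicate_succ] using this
    have hcons : pvW (r+1) ++ u = 'W' :: (pvW r ++ u) := by
      simp [pvW, List.replicate_succ]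
    rw [hcons]
    unfold pvStep
    rw [pvReplaceF]
    simp only [hpre, Bool.false_eq_true, if_false]
    rw [show pvReplaceF 'W' (pvW k) [ρ] (pvW r ++ u) = pvStep k ρ (pvW r ++ u) from rfl,
        ih (by omega)]
    simp [pvW, List.replicate_succ, pvStep]

theorem pvStep_run (k : Nat) (ρ : Char) : ∀ (L : Nat) (u : List Char), u.head? ≠ some 'W' →
    pvStep k ρ (pvW L ++ u) =
      List.replicate (L / (k+1)) ρ ++ pvW (L % (k+1)) ++ pvStep k ρ u := by
  intro L
  induction L using Nat.strong_induction_on with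
  | _ L ih =>
    intro u hu
    by_cases hL : L ≤ k
    · rw [pvStep_short_run k ρ L u hL hu]
      rw [Nat.div_eq_of_lt (by omega), Nat.mod_eq_of_lt (by omega)]
      simp
    · have hk1 : k + 1 ≤ L := by omega
      have hsplit : pvW L ++ u = 'W' :: (pvW k ++ (pvW (L - (k+1)) ++ u)) := by
        simp only [pvW, ← List.append_assoc, ← List.replicate_add]
        rw [show k + (L - (k+1)) = L - 1 by omega]
        rw [show L = (L-1) + 1 by omega]
        simp [List.replicate_succ]
      rw [hsplit]
      unfold pvStep
      rw [pvReplaceF]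
      have hpre : ('W' :: pvW k).isPrefixOf ('W' :: (pvW k ++ (pvW (L - (k+1)) ++ u))) = true := by
        simp [List.isPrefixOf_iff_prefix]
      simp only [hpre, if_true]
      rw [show (pvW k).length = k by simp [pvW], List.drop_left' (by simp [pvW])]
      rw [show pvReplaceF 'W' (pvW k) [ρ] (pvW (L - (k+1)) ++ u) = pvStep k ρ (pvW (L - (k+1)) ++ u) from rfl]
      rw [ih (L - (k+1)) (by omega) u hu]
      rw [show L / (k+1) = (L - (k+1)) / (k+1) + 1 from by
            rw [Nat.div_eq_sub_div (by omega) hk1]]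
      rw [show L % (k+1) = (L - (k+1)) % (k+1) from (Nat.mod_eq_sub_mod hk1)]
      simp only [List.replicate_succ, List.cons_append, List.singleton_append, List.append_assoc]
      rfl

theorem pvStep_passPrefix (k : Nat) (ρ : Char) (π u : List Char) (hπ : 'W' ∉ π) :
    pvStep k ρ (π ++ u) = π ++ pvStep k ρ u := by
  induction π with
  | nil => simp
  | cons c π ih =>
    have hc : c ≠ 'W' := fun h => hπ (h ▸ List.mem_cons_self)
    rw [List.cons_append, pvStep_cons k ρ c _ hc, ih (fun h => hπ (List.mem_cons_of_mem _ h))]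
    simp

theorem pvStep_head (k : Nat) (ρ : Char) (u : List Char) (hu : u.head? ≠ some 'W') :
    (pvStep k ρ u).head? ≠ some 'W' := by
  cases u with
  | nil => simp [pvStep_nil]
  | cons c t =>
    have hc : c ≠ 'W' := by simpa using hu
    rw [pvStep_cons k ρ c t hc]
    simpa using hc

def pvLetter (r : Nat) : Char :=
  if r = 9 then 'P' else if r = 8 then 'O' else if r = 7 then 'I' else if r = 6 then 'U'
  else if r = 5 then 'Y' else if r = 4 then 'T' else if r = 3 then 'R' else 'E'

def pvFoldSteps (ps : List (Nat × Char)) (s : List Char) : List Char :=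
  ps.foldl (fun t p => pvStep p.1 p.2 t) s

def pvStepsList : List (Nat × Char) :=
  [(8,'P'),(7,'O'),(6,'I'),(5,'U'),(4,'Y'),(3,'T'),(2,'R'),(1,'E')]

theorem pvFoldSteps_nil (ps : List (Nat × Char)) : pvFoldSteps ps [] = [] := by
  induction ps with
  | nil => rfl
  | cons p ps ih => simp [pvFoldSteps, pvStep_nil] at ih ⊢; simpa [pvStep_nil] using ih

theorem pvFoldSteps_cons (ps : List (Nat × Char)) (c : Char) (t : List Char) (hc : c ≠ 'W') :
    pvFoldSteps ps (c :: t) = c :: pvFoldSteps ps t := by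
  induction ps generalizing t with
  | nil => rfl
  | cons p ps ih =>
    simp only [pvFoldSteps, List.foldl_cons]
    rw [pvStep_cons p.1 p.2 c t hc]
    exact ih (pvStep p.1 p.2 t)

theorem pvFoldSteps_run : ∀ (ps : List (Nat × Char)) (π u : List Char) (r : Nat),
    (∀ p ∈ ps, p.2 = pvLetter (p.1 + 1) ∧ p.2 ≠ 'W' ∧ 1 ≤ p.1) →
    ((ps.map Prod.fst).Pairwise (· > ·)) →
    'W' ∉ π → u.head? ≠ some 'W' →
    (r ≤ 1 ∨ (r - 1) ∈ ps.map Prod.fst) →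
    pvFoldSteps ps (π ++ pvW r ++ u) =
      π ++ (if 2 ≤ r then [pvLetter r] else pvW r) ++ pvFoldSteps ps u := by
  intro ps
  induction ps with
  | nil =>
    intro π u r _ _ _ _ hr
    have : r ≤ 1 := by simpa using hr
    rw [if_neg (by omega)]
    rfl
  | cons p ps ih =>
    intro π u r hlet hdesc hπ hu hr
    obtain ⟨k, ρ⟩ := p
    obtain ⟨hρeq, hρW, hk⟩ := hlet (k, ρ) List.mem_cons_self
    simp only at hρeq hρW hk
    rw [show pvFoldSteps ((k,ρ)::ps) (π ++ pvW r ++ u) = pvFoldSteps ps (pvStep k ρ (π ++ pvW r ++ u)) from rfl,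
        show pvFoldSteps ((k,ρ)::ps) u = pvFoldSteps ps (pvStep k ρ u) from rfl]
    by_cases hcase : r = k + 1
    · subst hcase
      rw [List.append_assoc, pvStep_passPrefix k ρ π _ hπ, pvStep_run k ρ (k+1) u hu]
      rw [Nat.div_self (by omega), Nat.mod_self]
      have harr : π ++ (List.replicate 1 ρ ++ pvW 0 ++ pvStep k ρ u) =
          (π ++ [ρ]) ++ pvW 0 ++ pvStep k ρ u := by simp [pvW]
      rw [harr]
      have h2 : pvFoldSteps ps ((π ++ [ρ]) ++ pvW 0 ++ pvStep k ρ u) =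
          (π ++ [ρ]) ++ (if 2 ≤ 0 then [pvLetter 0] else pvW 0) ++ pvFoldSteps ps (pvStep k ρ u) := by
        apply ih
        · intro q hq; exact hlet q (List.mem_cons_of_mem _ hq)
        · exact (List.pairwise_cons.mp hdesc).2
        · intro h
          rcases List.mem_append.mp h with h | h
          · exact hπ h
          · simp at h; exact hρW h.symm
        · exact pvStep_head k ρ u hu
        · left; omega
      rw [h2]
      rw [if_neg (by omega), if_pos (by omega), ← hρeq]
      simp [pvW, pvFoldSteps]
    · have hrk : r ≤ k := by
        rcases hr with h | h
        · omega
        · simp only [List.map_cons, List.mem_cons] at h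
          rcases h with h | h
          · omega
          · have hpc : List.Pairwise (· > ·) (k :: ps.map Prod.fst) := by simpa using hdesc
            have hgt := (List.pairwise_cons.mp hpc).1 (r-1) h
            omega
      rw [List.append_assoc, pvStep_passPrefix k ρ π _ hπ,
          pvStep_short_run k ρ r u hrk hu, ← List.append_assoc]
      have h2 := ih π (pvStep k ρ u) r
        (fun q hq => hlet q (List.mem_cons_of_mem _ hq))
        (List.pairwise_cons.mp hdesc).2 hπ (pvStep_head k ρ u hu)
        (by
          rcases hr with h | h
          · exact Or.inl h
          · simp only [List.map_cons, List.mem_cons] at h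
            rcases h with h | h
            · omega
            · exact Or.inr h)
      rw [h2]

def pvAlist (s : List Char) : List Char := pvFoldSteps pvStepsList (pvStep 9 'Q' s)

theorem pvAlist_nil : pvAlist [] = [] := by
  rw [pvAlist, pvStep_nil, pvFoldSteps_nil]

theorem pvAlist_cons (c : Char) (t : List Char) (hc : c ≠ 'W') :
    pvAlist (c :: t) = c :: pvAlist t := by
  rw [pvAlist, pvStep_cons 9 'Q' c t hc, pvFoldSteps_cons _ _ _ hc, pvAlist]

theorem pvEncodeRun_eq (L : Nat) :
    pvEncodeRun L = List.replicate (L / 10) 'Q' ++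
      (if 2 ≤ L % 10 then [pvLetter (L % 10)] else pvW (L % 10)) := by
  have h : L % 10 < 10 := Nat.mod_lt _ (by omega)
  rw [pvEncodeRun]
  congr 1
  generalize L % 10 = r at h ⊢
  interval_cases r <;> decide

theorem pvAlist_run (L : Nat) (u : List Char) (hu : u.head? ≠ some 'W') :
    pvAlist (pvW L ++ u) = pvEncodeRun L ++ pvAlist u := by
  rw [pvAlist, pvStep_run 9 'Q' L u hu]
  have h10 : (9:Nat) + 1 = 10 := rfl
  rw [h10]
  have hrun := pvFoldSteps_run pvStepsList (List.replicate (L / 10) 'Q') (pvStep 9 'Q' u) (L % 10)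
    (by intro p hp; fin_cases hp <;> simp [pvLetter] <;> decide)
    (by decide)
    (by intro h; have := List.eq_of_mem_replicate h; exact absurd this (by decide))
    (pvStep_head 9 'Q' u hu)
    (by
      have h : L % 10 < 10 := Nat.mod_lt _ (by omega)
      by_cases h1 : L % 10 ≤ 1
      · exact Or.inl h1
      · right; simp [pvStepsList]; omega)
  rw [hrun, pvEncodeRun_eq, pvAlist]

theorem pvDropHead : ∀ (t : List Char), (t.dropWhile (· == 'W')).head? ≠ some 'W' := by
  intro t
  induction t with
  | nil => simp
  | cons c t ih =>
    by_cases hc : c = 'W'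
    · subst hc; simpa [List.dropWhile_cons] using ih
    · simp [List.dropWhile_cons, hc]

theorem pvTakeWhile_run (t : List Char) : t.takeWhile (· == 'W') = pvW ((t.takeWhile (· == 'W')).length) := by
  exact List.eq_replicate_iff.mpr ⟨rfl, fun b hb => by simpa using List.mem_takeWhile_imp hb⟩

theorem pvTWDW : ∀ (m : Nat) (u : List Char), u.head? ≠ some 'W' →
    (pvW m ++ u).takeWhile (· == 'W') = pvW m ∧ (pvW m ++ u).dropWhile (· == 'W') = u := by
  intro m
  induction m with
  | zero =>
    intro u hu
    cases u with
    | nil => simp [pvW]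
    | cons c t =>
      have hc : c ≠ 'W' := by simpa using hu
      simp [pvW, List.takeWhile_cons, List.dropWhile_cons, hc]
  | succ m ih =>
    intro u hu
    have h := ih u hu
    simp only [pvW, List.replicate_succ, List.cons_append, List.takeWhile_cons,
      List.dropWhile_cons]
    simp only [pvW] at h
    simp [h.1, h.2]

theorem pvGoB_run (L : Nat) (u : List Char) (hL : 1 ≤ L) (hu : u.head? ≠ some 'W') :
    pvGoB (pvW L ++ u) = pvEncodeRun L ++ pvGoB u := by
  obtain ⟨m, rfl⟩ : ∃ m, L = m + 1 := ⟨L - 1, by omega⟩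
  have hcons : pvW (m+1) ++ u = 'W' :: (pvW m ++ u) := by
    simp [pvW, List.replicate_succ]
  rw [hcons, pvGoB]
  have h := pvTWDW m u hu
  rw [if_pos rfl, h.1, h.2]
  have : (pvW m).length = m := by simp [pvW]
  rw [this, Nat.add_comm 1 m]

theorem pvAlist_eq_goB (s : List Char) : pvAlist s = pvGoB s := by
  have main : ∀ (n : Nat) (s : List Char), s.length ≤ n → pvAlist s = pvGoB s := by
    intro n
    induction n with
    | zero =>
      intro s h
      have : s = [] := by cases s <;> simp_all
      subst this
      rw [pvAlist_nil, pvGoB]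
    | succ n ih =>
      intro s h
      cases s with
      | nil => rw [pvAlist_nil, pvGoB]
      | cons c t =>
        by_cases hc : c = 'W'
        · subst hc
          set u := t.dropWhile (· == 'W') with hudef
          set m := (t.takeWhile (· == 'W')).length with hmdef
          have hdecomp : 'W' :: t = pvW (m + 1) ++ u := by
            have ht : t = t.takeWhile (· == 'W') ++ t.dropWhile (· == 'W') :=
              (List.takeWhile_append_dropWhile).symm
            calc 'W' :: t = 'W' :: (t.takeWhile (· == 'W') ++ u) := by rw [← ht]
            _ = pvW (m + 1) ++ u := by
                rw [pvTakeWhile_run t]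
                simp [pvW, List.replicate_succ]
                exact hmdef.symm
          have hu : u.head? ≠ some 'W' := pvDropHead t
          have hlen : u.length ≤ n := by
            have h1 : u.length ≤ t.length := hudef ▸ List.length_dropWhile_le (· == 'W') t
            simp at h
            omega
          rw [hdecomp, pvAlist_run _ _ hu, pvGoB_run _ _ (by omega) hu, ih u hlen]
        · have hlen : t.length ≤ n := by simp at h; omega
          rw [pvAlist_cons c t hc, pvGoB, if_neg hc, ih t hlen]
  exact main s.length s le_rfl

theorem pvStepStr (t : String) (k : Nat) (ρ : Char) (p ρs : String)
    (hp : p.toList = 'W' :: pvW k) (hρ : ρs.toList = [ρ]) :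
    PySem.Str.replace t p ρs = String.ofList (pvStep k ρ t.toList) := by
  rw [PySem.Str.replace, hp, hρ, pvReplace_eq]
  rfl

theorem pvBurst_toList (text : String) : burst_mode text = String.ofList (pvAlist text.toList) := by
  have hr : PySem.List.pyRange 10 1 (-1) = [10,9,8,7,6,5,4,3,2] := by decide
  unfold burst_mode
  rw [hr]
  simp only [List.foldl_cons, List.foldl_nil]
  rw [pvStepStr _ 1 'E' _ _ (by decide) (by decide),
      pvStepStr _ 2 'R' _ _ (by decide) (by decide),
      pvStepStr _ 3 'T' _ _ (by decide) (by decide),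
      pvStepStr _ 4 'Y' _ _ (by decide) (by decide),
      pvStepStr _ 5 'U' _ _ (by decide) (by decide),
      pvStepStr _ 6 'I' _ _ (by decide) (by decide),
      pvStepStr _ 7 'O' _ _ (by decide) (by decide),
      pvStepStr _ 8 'P' _ _ (by decide) (by decide),
      pvStepStr _ 9 'Q' _ _ (by decide) (by decide)]
  simp only [String.toList_ofList]
  rfl

-- ===== VERDICT (by name: the statement is the Claim_ definition above) =====
theorem burst_mode_spec : Claim_equal_burst_mode := by
  intro text _
  unfold Spec_burst_mode burst_mode_alt
  rw [pvBurst_toList, pvAlist_eq_goB]
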